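-- pv_equiv track=rewrite | github.com/udhitianshu/internhunt-backend | app/routes/resume_generate_routes.py | _break_long_tokens
-- ===== SOURCE A (Python) =====
-- def _break_long_tokens(text: str, max_token_len: int = 60) -> str:
--     parts = []
--     for token in text.split(" "):
--         if len(token) > max_token_len:
--             chunks = [token[i:i + max_token_len] for i in range(0, len(token), max_token_len)]
--             parts.append(" ".join(chunks))
--         else:
--             parts.append(token)
--     return " ".join(parts)
-- ===== SOURCE B (Python) =====
-- def _break_long_tokens(text: str, max_token_len: int = 60) -> str:
--     out = []
--     count = 0
--     for ch in text:
--         if ch == ' ':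
--             out.append(ch)
--             count = 0
--         else:
--             if count == max_token_len:
--                 out.append(' ')
--                 count = 0
--             out.append(ch)
--             count += 1
--     return ''.join(out)
-- ===== Notes on version B (the rewrite author's own statement) =====
-- stated objective: alternative
-- what changed: Replaces split-on-space / per-token range-slice chunking / double join with a single left-to-right character scan that maintains the current non-space run length and inserts a space whenever it reaches max_token_len.
-- outside the precondition, e.g. on _break_long_tokens('ab', -1): A returns '', B returns 'ab'; on _break_long_tokens('ab', 0): A raises ValueError, B returns ' ab'
import Mathlib
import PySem

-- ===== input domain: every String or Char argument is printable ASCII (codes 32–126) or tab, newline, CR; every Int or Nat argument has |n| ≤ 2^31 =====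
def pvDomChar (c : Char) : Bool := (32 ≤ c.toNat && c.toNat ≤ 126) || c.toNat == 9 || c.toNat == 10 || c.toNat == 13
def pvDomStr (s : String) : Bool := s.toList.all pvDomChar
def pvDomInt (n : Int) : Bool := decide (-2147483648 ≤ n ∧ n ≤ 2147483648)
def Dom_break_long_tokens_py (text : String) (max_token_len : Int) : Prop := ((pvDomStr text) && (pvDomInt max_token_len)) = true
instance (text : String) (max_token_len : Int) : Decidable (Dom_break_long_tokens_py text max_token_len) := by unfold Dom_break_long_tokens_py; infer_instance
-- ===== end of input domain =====

-- B replaces split-on-space + per-token range/slice chunking + double join by a single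
-- left-to-right character scan with a run-length counter (alternative decomposition, same cost).


-- ===== PORT A =====
def break_long_tokens_py (text : String) (max_token_len : Int) : String :=
  String.ofList (PySem.Chars.join [' ']
    ((PySem.Chars.splitOn text.toList [' ']).foldl
      (fun parts token =>
        if PySem.Chars.len token > max_token_len then
          parts ++ [PySem.Chars.join [' ']
            ((PySem.List.pyRange 0 (PySem.Chars.len token) max_token_len).map
              (fun i => PySem.Chars.slice token (some i) (some (i + max_token_len))))]
        else parts ++ [token])
      []))

-- ===== PORT B =====
def break_long_tokens_py_alt (text : String) (max_token_len : Int) : String :=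
  String.ofList
    (text.toList.foldl
      (fun (st : List Char × Int) ch =>
        if ch = ' ' then (st.1 ++ [ch], (0 : Int))
        else
          let st2 := if st.2 = max_token_len then (st.1 ++ [' '], (0 : Int)) else st
          (st2.1 ++ [ch], st2.2 + 1))
      ([], 0)).1

-- ===== PRECONDITION & SPEC =====
-- Pre_ restricts to the natural domain max_token_len ≥ 1: for max_token_len = 0 A raises
-- ValueError (range() step 0), and for negative values A deletes every non-space character
-- (" ".join over an empty chunks list), an artefact of its implementation; B leaves the text
-- unchanged there.
def Pre_break_long_tokens_py (text : String) (max_token_len : Int) : Prop := 1 ≤ max_token_len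
instance (text : String) (max_token_len : Int) : Decidable (Pre_break_long_tokens_py text max_token_len) := by unfold Pre_break_long_tokens_py; infer_instance
def pvWitness_break_long_tokens_py : String × Int := ("hello world", 3)

def Spec_break_long_tokens_py (text : String) (max_token_len : Int) (out : String) : Prop := out = break_long_tokens_py_alt text max_token_len
instance (text : String) (max_token_len : Int) (out : String) : Decidable (Spec_break_long_tokens_py text max_token_len out) := by unfold Spec_break_long_tokens_py; infer_instance

-- ===== CLAIM (what is proved, stated in full; the proofs are below) =====
def Claim_equal_break_long_tokens_py : Prop := ∀ (text : String) (max_token_len : Int), Dom_break_long_tokens_py text max_token_len → Pre_break_long_tokens_py text max_token_len → Spec_break_long_tokens_py text max_token_len (break_long_tokens_py text max_token_len)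

-- ===== LEMMAS AND PROOFS =====

-- split of a list of chars on a single space, accumulator style (first token prefix `pre`)
def mySplit : List Char → List Char → List (List Char)
  | pre, [] => [pre]
  | pre, c :: cs => if c = ' ' then pre :: mySplit [] cs else mySplit (pre ++ [c]) cs

-- chunking of a space-free run: emit chars, inserting ' ' when the remaining-in-chunk
-- counter r hits 0 (the char emitted after the space starts a fresh chunk of size M)
def chunkC (M : Nat) : Nat → List Char → List Char
  | _, [] => []
  | r, c :: ts => if r = 0 then ' ' :: c :: chunkC M (M - 1) ts else c :: chunkC M (r - 1) ts

-- the char scan B performs, in functional form (a space resets the counter)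
def emul (M : Nat) : Nat → List Char → List Char
  | _, [] => []
  | r, c :: ts =>
    if c = ' ' then ' ' :: emul M M ts
    else if r = 0 then ' ' :: c :: emul M (M - 1) ts
    else c :: emul M (r - 1) ts

-- B's loop step, named for the proofs (definitionally the lambda in the port)
def stepB (m : Int) : List Char × Int → Char → List Char × Int := fun st ch =>
  if ch = ' ' then (st.1 ++ [ch], (0 : Int))
  else
    let st2 := if st.2 = m then (st.1 ++ [' '], (0 : Int)) else st
    (st2.1 ++ [ch], st2.2 + 1)

theorem go_char (fuel : Nat) : ∀ (l cur : List Char) (acc : List (List Char)), l.length < fuel →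
    PySem.Chars.splitOn.go [' '] fuel l cur acc = acc.reverse ++ mySplit cur.reverse l := by
  induction fuel with
  | zero => intro l cur acc h; omega
  | succ n ih =>
    intro l cur acc h
    cases l with
    | nil => simp [PySem.Chars.splitOn.go, mySplit]
    | cons c rest =>
      by_cases hc : c = ' '
      · subst hc
        have : PySem.Chars.splitOn.go [' '] (n + 1) (' ' :: rest) cur acc
            = PySem.Chars.splitOn.go [' '] n rest [] (cur.reverse :: acc) := by
          simp [PySem.Chars.splitOn.go, List.isPrefixOf]
        rw [this, ih rest [] (cur.reverse :: acc) (by simpa using Nat.lt_of_succ_lt_succ h)]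
        simp [mySplit]
      · have : PySem.Chars.splitOn.go [' '] (n + 1) (c :: rest) cur acc
            = PySem.Chars.splitOn.go [' '] n rest (c :: cur) acc := by
          simp [PySem.Chars.splitOn.go, List.isPrefixOf, Ne.symm hc]
        rw [this, ih rest (c :: cur) acc (by simpa using Nat.lt_of_succ_lt_succ h)]
        simp [mySplit, hc]

theorem splitOn_char (cs : List Char) : PySem.Chars.splitOn cs [' '] = mySplit [] cs := by
  have := go_char (cs.length + 1) cs [] [] (by omega)
  simpa [PySem.Chars.splitOn] using this

theorem chunk_of_le (M : Nat) : ∀ (r : Nat) (t : List Char), t.length ≤ r → chunkC M r t = t := by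
  intro r t
  induction t generalizing r with
  | nil => intro _; simp [chunkC]
  | cons c ts ih =>
    intro h
    have hr : r ≠ 0 := by simp at h; omega
    simp [chunkC, hr, ih (r - 1) (by simp at h ⊢; omega)]

theorem chunk_take (M : Nat) (hM : 1 ≤ M) :
    ∀ (r : Nat) (t : List Char), r < t.length →
      chunkC M r t = t.take r ++ ' ' :: chunkC M M (t.drop r) := by
  intro r
  induction r with
  | zero =>
    intro t h
    cases t with
    | nil => simp at h
    | cons c ts =>
      have hM0 : M ≠ 0 := by omega
      simp [chunkC, hM0]
  | succ r ih =>
    intro t h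
    cases t with
    | nil => simp at h
    | cons c ts =>
      simp only [chunkC, Nat.succ_ne_zero, if_false, Nat.add_sub_cancel]
      rw [ih ts (by simp at h; omega)]
      simp

theorem emul_no_space (M : Nat) : ∀ (cs : List Char) (r : Nat), ' ' ∉ cs → emul M r cs = chunkC M r cs := by
  intro cs
  induction cs with
  | nil => intro r _; simp [emul, chunkC]
  | cons c ts ih =>
    intro r h
    have hc : ¬ (c = ' ') := by intro hh; exact h (by simp [hh])
    have ht : ' ' ∉ ts := fun hm => h (List.mem_cons_of_mem _ hm)
    by_cases hr : r = 0
    · simp [emul, chunkC, hc, hr, ih _ ht]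
    · simp [emul, chunkC, hc, hr, ih _ ht]

theorem emul_split (M : Nat) : ∀ (t : List Char) (r : Nat) (rest : List Char), ' ' ∉ t →
    emul M r (t ++ ' ' :: rest) = chunkC M r t ++ ' ' :: emul M M rest := by
  intro t
  induction t with
  | nil => intro r rest _; simp [emul, chunkC]
  | cons c ts ih =>
    intro r rest h
    have hc : ¬ (c = ' ') := by intro hh; exact h (by simp [hh])
    have ht : ' ' ∉ ts := fun hm => h (List.mem_cons_of_mem _ hm)
    by_cases hr : r = 0
    · simp [emul, chunkC, hc, hr, ih _ _ ht]
    · simp [emul, chunkC, hc, hr, ih _ _ ht]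

theorem mySplit_no_space : ∀ (cs pre : List Char), ' ' ∉ cs → mySplit pre cs = [pre ++ cs] := by
  intro cs
  induction cs with
  | nil => intro pre _; simp [mySplit]
  | cons c ts ih =>
    intro pre h
    have hc : ¬ (c = ' ') := by intro hh; exact h (by simp [hh])
    have ht : ' ' ∉ ts := fun hm => h (List.mem_cons_of_mem _ hm)
    simp [mySplit, hc, ih _ ht]

theorem mySplit_split : ∀ (t pre rest : List Char), ' ' ∉ t →
    mySplit pre (t ++ ' ' :: rest) = (pre ++ t) :: mySplit [] rest := by
  intro t
  induction t with
  | nil => intro pre rest _; simp [mySplit]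
  | cons c ts ih =>
    intro pre rest h
    have hc : ¬ (c = ' ') := by intro hh; exact h (by simp [hh])
    have ht : ' ' ∉ ts := fun hm => h (List.mem_cons_of_mem _ hm)
    simp [mySplit, hc, ih _ _ ht]

theorem mySplit_ne_nil : ∀ (pre cs : List Char), mySplit pre cs ≠ [] := by
  intro pre cs
  induction cs generalizing pre with
  | nil => simp [mySplit]
  | cons c ts ih =>
    by_cases hc : c = ' '
    · simp [mySplit, hc]
    · simp [mySplit, hc]; exact ih _

theorem join_cons_of_ne_nil (x : List Char) (l : List (List Char)) (h : l ≠ []) :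
    PySem.Chars.join [' '] (x :: l) = x ++ ' ' :: PySem.Chars.join [' '] l := by
  cases l with
  | nil => exact absurd rfl h
  | cons y tl => rw [PySem.Chars.join_cons_cons]; simp

theorem split_at_space : ∀ (cs : List Char), ' ' ∈ cs →
    ∃ t rs, cs = t ++ ' ' :: rs ∧ ' ' ∉ t := by
  intro cs
  induction cs with
  | nil => intro h; simp at h
  | cons c ts ih =>
    intro h
    by_cases hc : c = ' '
    · exact ⟨[], ts, by simp [hc], by simp⟩
    · have : ' ' ∈ ts := by
        rcases List.mem_cons.mp h with h1 | h1
        · exact absurd h1.symm hc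
        · exact h1
      obtain ⟨t, rs, heq, hnt⟩ := ih this
      exact ⟨c :: t, rs, by simp [heq], by simp [hnt]; exact fun hh => hc hh.symm⟩

-- joining the range/slice chunks equals chunkC (A-side)
theorem join_range_chunks (M : Nat) (hM : 1 ≤ M) (n : Nat) :
    ∀ (u : List Char), M * n < u.length → u.length ≤ M * (n + 1) →
      PySem.Chars.join [' ']
        ((List.range (n + 1)).map (fun k => List.take M (List.drop (M * k) u))) = chunkC M M u := by
  induction n with
  | zero =>
    intro u h1 h2
    rw [show List.range (0 + 1) = [0] from rfl]
    simp only [List.map_cons, List.map_nil, Nat.mul_zero, List.drop_zero]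
    rw [PySem.Chars.join_singleton]
    rw [List.take_of_length_le (by omega), chunk_of_le M M u (by omega)]
  | succ n ih =>
    intro u h1 h2
    have hrange := List.range_succ_eq_map (n := n + 1)
    rw [hrange, List.map_cons, List.map_map]
    have hmap : (List.range (n + 1)).map ((fun k => List.take M (List.drop (M * k) u)) ∘ Nat.succ)
        = (List.range (n + 1)).map (fun k => List.take M (List.drop (M * k) (u.drop M))) := by
      refine List.map_congr_left (fun k _ => ?_)
      simp only [Function.comp_apply]
      rw [List.drop_drop]
      congr 2
      rw [Nat.mul_succ]
      omega
    rw [hmap]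
    rw [join_cons_of_ne_nil _ _ (by simp)]
    have hM1 : M ≤ M * (n + 1) := Nat.le_mul_of_pos_right M (by omega)
    have hMlen : M < u.length := by omega
    rw [ih (u.drop M) (by rw [List.length_drop]; rw [Nat.mul_succ] at h1; omega)
        (by rw [List.length_drop]; rw [Nat.mul_succ] at h2; omega)]
    rw [chunk_take M hM M u hMlen]
    simp

theorem perToken_eq (m : Int) (hm : 1 ≤ m) (token : List Char) :
    (if PySem.Chars.len token > m then
      PySem.Chars.join [' ']
        ((PySem.List.pyRange 0 (PySem.Chars.len token) m).map
          (fun i => PySem.Chars.slice token (some i) (some (i + m))))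
     else token) = chunkC m.toNat m.toNat token := by
  have hMm : (m.toNat : Int) = m := Int.toNat_of_nonneg (by omega)
  have hM : 1 ≤ m.toNat := by omega
  simp only [PySem.Chars.len_eq]
  by_cases hgt : (token.length : Int) > m
  · rw [if_pos hgt]
    have hLM : m.toNat < token.length := by omega
    rw [PySem.List.pyRange_of_pos 0 (token.length : Int) (by omega)]
    rw [if_pos (by omega : (0 : Int) < (token.length : Int))]
    have hb1 : m.toNat * ((token.length - 1) / m.toNat) ≤ token.length - 1 := by
      rw [Nat.mul_comm]; exact Nat.div_mul_le_self _ _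
    have hdm : m.toNat * ((token.length - 1) / m.toNat) + (token.length - 1) % m.toNat
        = token.length - 1 := Nat.div_add_mod _ _
    have hmod : (token.length - 1) % m.toNat < m.toNat := Nat.mod_lt _ (by omega)
    set n := (token.length - 1) / m.toNat with hn
    have hb1' : m.toNat * n < token.length := by omega
    have hb2 : token.length ≤ m.toNat * (n + 1) := by rw [Nat.mul_succ]; omega
    have hdivN : (token.length + m.toNat - 1) / m.toNat = n + 1 := by
      rw [show token.length + m.toNat - 1 = (token.length - 1) + m.toNat by omega,
          Nat.add_div_right _ (by omega), ← hn]
    have hcount : (((token.length : Int) - 0 + m - 1) / m).toNat = n + 1 := by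
      have e1 : (token.length : Int) - 0 + m - 1 = ((token.length + m.toNat - 1 : Nat) : Int) := by
        rw [← hMm]; omega
      have e3 := Int.natCast_div (token.length + m.toNat - 1) m.toNat
      rw [hdivN, hMm] at e3
      rw [e1, ← e3]
      exact Int.toNat_natCast _
    rw [hcount, List.map_map]
    have hmap : (List.range (n + 1)).map
          ((fun i => PySem.Chars.slice token (some i) (some (i + m))) ∘ (fun (k : Nat) => 0 + m * (k : Int)))
        = (List.range (n + 1)).map (fun (k : Nat) => List.take m.toNat (List.drop (m.toNat * k) token)) := by
      refine List.map_congr_left (fun k _ => ?_)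
      simp only [Function.comp_apply]
      have e2 : (0 : Int) + m * (k : Int) = ((m.toNat * k : Nat) : Int) := by
        push_cast [hMm]; ring
      rw [e2, PySem.Chars.slice_eq_listSlice,
          show ((m.toNat * k : Nat) : Int) + m = ((m.toNat * k : Nat) : Int) + (m.toNat : Int) by rw [hMm]]
      exact PySem.List.slice_natCast_add token (m.toNat * k) m.toNat
    rw [hmap]
    exact join_range_chunks m.toNat hM n token hb1' hb2
  · rw [if_neg hgt]
    exact (chunk_of_le m.toNat m.toNat token (by omega)).symm

theorem foldl_two_appends {α β : Type} (c : α → Prop) [DecidablePred c] (f g : α → β) :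
    ∀ (l : List α) (acc : List β),
      l.foldl (fun ps t => if c t then ps ++ [f t] else ps ++ [g t]) acc
        = acc ++ l.map (fun t => if c t then f t else g t) := by
  intro l
  induction l with
  | nil => intro acc; simp
  | cons x xs ih =>
    intro acc
    by_cases hx : c x
    · simp [hx, ih]
    · simp [hx, ih]

theorem scan_eq (m : Int) (hm : 1 ≤ m) :
    ∀ (cs : List Char) (acc : List Char) (k : Int), 0 ≤ k → k ≤ m →
      (cs.foldl (stepB m) (acc, k)).1 = acc ++ emul m.toNat (m.toNat - k.toNat) cs := by
  intro cs
  induction cs with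
  | nil => intro acc k _ _; simp [emul]
  | cons ch cs ih =>
    intro acc k hk0 hkm
    by_cases hch : ch = ' '
    · rw [List.foldl_cons, show stepB m (acc, k) ch = (acc ++ [ch], 0) by simp [stepB, hch]]
      rw [ih (acc ++ [ch]) 0 le_rfl (by omega)]
      simp [emul, hch]
    · by_cases hkeq : k = m
      · rw [List.foldl_cons,
            show stepB m (acc, k) ch = (acc ++ [' '] ++ [ch], 1) by simp [stepB, hch, hkeq]]
        rw [ih (acc ++ [' '] ++ [ch]) 1 (by omega) (by omega)]
        have hr : m.toNat - k.toNat = 0 := by omega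
        have hr1 : m.toNat - (1 : Int).toNat = m.toNat - 1 := rfl
        rw [hr, hr1]
        simp [emul, hch]
      · rw [List.foldl_cons,
            show stepB m (acc, k) ch = (acc ++ [ch], k + 1) by simp [stepB, hch, hkeq]]
        rw [ih (acc ++ [ch]) (k + 1) (by omega) (by omega)]
        have hr : m.toNat - k.toNat ≠ 0 := by omega
        have harg : m.toNat - (k + 1).toNat = m.toNat - k.toNat - 1 := by omega
        rw [harg]
        simp [emul, hch, hr]

theorem bridge (M : Nat) :
    ∀ (cs : List Char),
      PySem.Chars.join [' '] ((mySplit [] cs).map (chunkC M M)) = emul M M cs := by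
  have main : ∀ (n : Nat) (cs : List Char), cs.length ≤ n →
      PySem.Chars.join [' '] ((mySplit [] cs).map (chunkC M M)) = emul M M cs := by
    intro n
    induction n with
    | zero =>
      intro cs h
      have : cs = [] := List.eq_nil_of_length_eq_zero (by omega)
      subst this
      simp [mySplit, emul, PySem.Chars.join_singleton, chunkC]
    | succ n ih =>
      intro cs h
      by_cases hsp : ' ' ∈ cs
      · obtain ⟨t, rs, heq, hnt⟩ := split_at_space cs hsp
        subst heq
        rw [mySplit_split t [] rs hnt]
        simp only [List.nil_append, List.map_cons]
        rw [join_cons_of_ne_nil _ _ (by simp [mySplit_ne_nil])]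
        rw [ih rs (by simp at h; omega), ← emul_split M t M rs hnt]
      · rw [mySplit_no_space cs [] hsp]
        simp only [List.nil_append, List.map_cons, List.map_nil]
        rw [PySem.Chars.join_singleton]
        exact (emul_no_space M cs M hsp).symm
  exact fun cs => main cs.length cs le_rfl

-- ===== VERDICT (by name: the statement is the Claim_ definition above) =====
theorem break_long_tokens_py_spec : Claim_equal_break_long_tokens_py := by
  intro text m _ hm
  have hm' : (1 : Int) ≤ m := hm
  unfold Spec_break_long_tokens_py
  have hAv : break_long_tokens_py text m = String.ofList (emul m.toNat m.toNat text.toList) := by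
    unfold break_long_tokens_py
    rw [splitOn_char, foldl_two_appends (fun token => PySem.Chars.len token > m)]
    simp only [List.nil_append]
    rw [List.map_congr_left (fun token _ => perToken_eq m hm' token)]
    rw [bridge m.toNat text.toList]
  have hBv : break_long_tokens_py_alt text m
      = String.ofList (List.foldl (stepB m) ([], 0) text.toList).1 := rfl
  rw [hAv, hBv, scan_eq m hm' text.toList [] 0 le_rfl (by omega)]
  simp
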